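-- pv_equiv track=rewrite | github.com/CHANDRAPRAKASH-web/OCR-NEW | Parselast.py | is_likely_name
-- ===== SOURCE A (Python) =====
-- def is_likely_name(line: str) -> bool:
--     if not line or any(ch.isdigit() for ch in line):
--         return False
--     words = [w for w in line.strip().split() if w]
--     if not words or len(words) > 6:
--         return False
--     capital_words = sum(1 for w in words if w and w[0].isupper())
--     return capital_words >= max(1, len(words)//2)
-- ===== SOURCE B (Python) =====
-- def is_likely_name(line: str) -> bool:
--     # single pass: tokenize manually, counting words and capitalized word-starts
--     words = 0
--     caps = 0
--     in_word = False
--     for ch in line: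
--         if ch.isdigit():
--             return False
--         if ch.isspace():
--             in_word = False
--         elif not in_word:
--             in_word = True
--             words += 1
--             if ch.isupper():
--                 caps += 1
--     return 1 <= words <= 6 and caps >= max(1, words // 2)
-- ===== Notes on version B (the rewrite author's own statement) =====
-- stated objective: alternative
-- what changed: A's multi-pass pipeline (digit scan over the whole line, strip+split building a word list, then two filter passes over it) is replaced by a single character-level scan that tokenizes the line itself with an in-word flag, counting words and capitalized word starts as it goes.
import Mathlib
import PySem

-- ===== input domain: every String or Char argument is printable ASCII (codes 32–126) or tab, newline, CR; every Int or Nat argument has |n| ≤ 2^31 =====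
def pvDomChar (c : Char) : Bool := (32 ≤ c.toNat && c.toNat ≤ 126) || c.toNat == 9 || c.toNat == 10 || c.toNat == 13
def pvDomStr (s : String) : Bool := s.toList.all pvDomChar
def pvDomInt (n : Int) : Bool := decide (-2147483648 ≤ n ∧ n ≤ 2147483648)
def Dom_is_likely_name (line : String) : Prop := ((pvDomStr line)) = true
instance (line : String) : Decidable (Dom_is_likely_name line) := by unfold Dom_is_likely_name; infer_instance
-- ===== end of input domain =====

-- B replaces A's multi-pass pipeline (digit scan, strip+split, two filters) by one
-- character-level scan that tokenizes the line itself; objective: alternative decomposition.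

-- ===== PORT A =====
-- transliteration of A on line.toList (truthiness of a str = nonemptiness; w[0] is safe
-- because it is guarded by w's truthiness, so it is ported as the head of the word)
def is_likely_name (line : String) : Bool :=
  let s := line.toList
  if s.isEmpty || s.any PySem.Chars.isdigit then false
  else
    let words := (PySem.Chars.split₀ (PySem.Chars.strip s)).filter (fun w => !w.isEmpty)
    if words.isEmpty || decide (words.length > 6) then false
    else
      let capital_words :=
        (words.filter (fun w => !w.isEmpty &&
          (match w with | [] => false | c :: _ => PySem.Chars.isupper c))).length
      decide ((capital_words : Int) ≥ max 1 (PySem.Int.floordiv (words.length : Int) 2))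

-- ===== PORT B =====
def altLoop : List Char → Bool → Nat → Nat → Bool
  | [], _, words, caps =>
      decide (1 ≤ words) && decide (words ≤ 6) && decide (caps ≥ max 1 (words / 2))
  | c :: rest, inWord, words, caps =>
      if PySem.Chars.isdigit c then false
      else if PySem.Chars.isspace c then altLoop rest false words caps
      else if !inWord then
        altLoop rest true (words + 1) (caps + if PySem.Chars.isupper c then 1 else 0)
      else altLoop rest true words caps

def is_likely_name_alt (line : String) : Bool := altLoop line.toList false 0 0

-- ===== PRECONDITION & SPEC =====
def Spec_is_likely_name (line : String) (out : Bool) : Prop := out = is_likely_name_alt line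
instance (line : String) (out : Bool) : Decidable (Spec_is_likely_name line out) := by unfold Spec_is_likely_name; infer_instance

-- ===== CLAIM (what is proved, stated in full; the proofs are below) =====
def Claim_equal_is_likely_name : Prop := ∀ (line : String), Dom_is_likely_name line → Spec_is_likely_name line (is_likely_name line)

-- ===== LEMMAS AND PROOFS =====

-- the final test shared by both programs, on word/capital counts
def pvCheck (w c : Nat) : Bool :=
  decide (1 ≤ w) && decide (w ≤ 6) && decide (c ≥ max 1 (w / 2))

def pvCapB : List Char → Bool
  | [] => false
  | c :: _ => PySem.Chars.isupper c

def pvCapCount (ws : List (List Char)) : Nat := (ws.filter pvCapB).length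

def pvNotSpace (c : Char) : Bool := !PySem.Chars.isspace c

theorem pvCapCount_cons (x : List Char) (ws : List (List Char)) :
    pvCapCount (x :: ws) = (if pvCapB x then 1 else 0) + pvCapCount ws := by
  unfold pvCapCount
  rw [List.filter_cons]
  split <;> simp [Nat.add_comm]

theorem go_acc (s : List Char) (cur : List Char) (acc : List (List Char)) :
    PySem.Chars.split₀.go s cur acc = acc.reverse ++ PySem.Chars.split₀.go s cur [] := by
  induction s generalizing cur acc with
  | nil => by_cases h : cur.isEmpty <;> simp [PySem.Chars.split₀.go, h]
  | cons c rest ih =>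
    by_cases hs : PySem.Chars.isspace c
    · by_cases hc : cur.isEmpty
      · simp only [PySem.Chars.split₀.go, hs, hc, if_true]
        exact ih [] acc
      · rw [PySem.Chars.split₀.go, if_pos hs, if_neg (by simp [hc]),
            PySem.Chars.split₀.go, if_pos hs, if_neg (by simp [hc]),
            ih _ (cur.reverse :: acc), ih _ [cur.reverse]]
        simp
    · rw [PySem.Chars.split₀.go, if_neg (by simp [hs]),
          PySem.Chars.split₀.go, if_neg (by simp [hs]), ih]

theorem split₀_space_cons (c : Char) (rest : List Char) (hs : PySem.Chars.isspace c = true) :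
    PySem.Chars.split₀ (c :: rest) = PySem.Chars.split₀ rest := by
  simp [PySem.Chars.split₀, PySem.Chars.split₀.go, hs]

theorem go_mid (s cur : List Char) (hc : cur ≠ []) :
    PySem.Chars.split₀.go s cur [] =
      (cur.reverse ++ s.takeWhile pvNotSpace) :: PySem.Chars.split₀ (s.dropWhile pvNotSpace) := by
  induction s generalizing cur with
  | nil => simp [PySem.Chars.split₀.go, hc, PySem.Chars.split₀]
  | cons c rest ih =>
    by_cases hs : PySem.Chars.isspace c
    · rw [PySem.Chars.split₀.go, if_pos hs, if_neg (by simp [hc]), go_acc,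
          List.takeWhile_cons_of_neg (by simp [pvNotSpace, hs]),
          List.dropWhile_cons_of_neg (by simp [pvNotSpace, hs]),
          split₀_space_cons c rest hs]
      simp [PySem.Chars.split₀]
    · rw [PySem.Chars.split₀.go, if_neg (by simp [hs]), ih (c :: cur) (by simp),
          List.takeWhile_cons_of_pos (by simp [pvNotSpace, hs]),
          List.dropWhile_cons_of_pos (by simp [pvNotSpace, hs])]
      simp

theorem split₀_word_cons (c : Char) (rest : List Char) (hs : PySem.Chars.isspace c = false) :
    PySem.Chars.split₀ (c :: rest) =
      (c :: rest.takeWhile pvNotSpace) :: PySem.Chars.split₀ (rest.dropWhile pvNotSpace) := by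
  rw [PySem.Chars.split₀, PySem.Chars.split₀.go, if_neg (by simp [hs]),
      go_mid rest [c] (by simp)]
  rfl

-- B's loop computes the word/capital counts of split₀ of the (rest of the) line
theorem altLoop_spec (s : List Char) (inWord : Bool) (w c : Nat)
    (hd : s.any PySem.Chars.isdigit = false) :
    altLoop s inWord w c =
      (let r := PySem.Chars.split₀ (cond inWord (s.dropWhile pvNotSpace) s)
       pvCheck (w + r.length) (c + pvCapCount r)) := by
  induction s generalizing inWord w c with
  | nil => cases inWord <;> simp [altLoop, PySem.Chars.split₀, PySem.Chars.split₀.go, pvCheck, pvCapCount]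
  | cons x rest ih =>
    simp only [List.any_cons, Bool.or_eq_false_iff] at hd
    obtain ⟨hx, hrest⟩ := hd
    by_cases hs : PySem.Chars.isspace x
    · rw [altLoop, if_neg (by simp [hx]), if_pos hs, ih false w c hrest]
      cases inWord <;>
        simp [split₀_space_cons x rest hs,
          List.dropWhile_cons_of_neg (by simp [pvNotSpace, hs] : ¬ pvNotSpace x = true)]
    · have hs' : PySem.Chars.isspace x = false := by simpa using hs
      cases inWord with
      | true =>
        rw [show altLoop (x :: rest) true w c = altLoop rest true w c by
          simp [altLoop, hx, hs']]
        rw [ih true w c hrest]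
        simp [List.dropWhile_cons_of_pos (by simp [pvNotSpace, hs'] : pvNotSpace x = true)]
      | false =>
        rw [show altLoop (x :: rest) false w c
            = altLoop rest true (w + 1) (c + if PySem.Chars.isupper x then 1 else 0) by
          simp [altLoop, hx, hs']]
        rw [ih true (w + 1) (c + if PySem.Chars.isupper x then 1 else 0) hrest]
        simp only [Bool.cond_true, Bool.cond_false]
        rw [split₀_word_cons x rest hs']
        simp only [List.length_cons, pvCapCount_cons]
        have hcap : pvCapB (x :: rest.takeWhile pvNotSpace) = PySem.Chars.isupper x := rfl
        rw [hcap]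
        congr 1
        · omega
        · by_cases hu : PySem.Chars.isupper x <;> simp [hu]
          omega

theorem altLoop_digit (s : List Char) (inWord : Bool) (w c : Nat)
    (hd : s.any PySem.Chars.isdigit = true) :
    altLoop s inWord w c = false := by
  induction s generalizing inWord w c with
  | nil => simp at hd
  | cons x rest ih =>
    by_cases hx : PySem.Chars.isdigit x
    · simp [altLoop, hx]
    · simp only [List.any_cons, hx, Bool.false_or] at hd
      by_cases hs : PySem.Chars.isspace x <;> cases inWord <;>
        simp [altLoop, hx, hs, ih _ _ _ hd]

-- split₀ contains no empty words
theorem split₀_ne_nil : ∀ (s : List Char), ∀ w ∈ PySem.Chars.split₀ s, w ≠ []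
  | [] => by simp [PySem.Chars.split₀, PySem.Chars.split₀.go]
  | c :: rest => by
    by_cases hs : PySem.Chars.isspace c
    · rw [split₀_space_cons c rest hs]
      exact split₀_ne_nil rest
    · rw [split₀_word_cons c rest (by simpa using hs)]
      intro w hw
      rcases List.mem_cons.mp hw with hw | hw
      · simp [hw]
      · exact split₀_ne_nil _ w hw
  termination_by s => s.length
  decreasing_by
    · simp
    · have := (List.dropWhile_sublist (p := pvNotSpace) (l := rest)).length_le
      simp
      omega

-- all-whitespace lists split to nothing
theorem split₀_all_space (sp : List Char) (h : ∀ c ∈ sp, PySem.Chars.isspace c = true) :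
    PySem.Chars.split₀ sp = [] := by
  induction sp with
  | nil => simp [PySem.Chars.split₀, PySem.Chars.split₀.go]
  | cons c rest ih =>
    rw [split₀_space_cons c rest (h c (by simp))]
    exact ih (fun c hc => h c (by simp [hc]))

theorem takeWhile_space_nil (sp : List Char) (h : ∀ c ∈ sp, PySem.Chars.isspace c = true) :
    sp.takeWhile pvNotSpace = [] := by
  cases sp with
  | nil => simp
  | cons c rest =>
    rw [List.takeWhile_cons_of_neg (by simp [pvNotSpace, h c (by simp)])]

theorem dropWhile_space_self (sp : List Char) (h : ∀ c ∈ sp, PySem.Chars.isspace c = true) :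
    sp.dropWhile pvNotSpace = sp := by
  cases sp with
  | nil => simp
  | cons c rest =>
    rw [List.dropWhile_cons_of_neg (by simp [pvNotSpace, h c (by simp)])]

-- trailing whitespace does not change split₀
theorem split₀_append_space (sp : List Char) (h : ∀ c ∈ sp, PySem.Chars.isspace c = true) :
    ∀ (t : List Char), PySem.Chars.split₀ (t ++ sp) = PySem.Chars.split₀ t
  | [] => by simpa using split₀_all_space sp h
  | c :: rest => by
    by_cases hs : PySem.Chars.isspace c
    · rw [List.cons_append, split₀_space_cons c _ hs, split₀_space_cons c rest hs]
      exact split₀_append_space sp h rest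
    · rw [List.cons_append, split₀_word_cons c _ (by simpa using hs),
          split₀_word_cons c rest (by simpa using hs)]
      by_cases hall : ∀ x ∈ rest, pvNotSpace x = true
      · have ht : rest.takeWhile pvNotSpace = rest := List.takeWhile_eq_self_iff.mpr hall
        have hdr : rest.dropWhile pvNotSpace = [] := List.dropWhile_eq_nil_iff.mpr hall
        rw [List.takeWhile_append, if_pos (by rw [ht]), List.dropWhile_append, hdr,
            if_pos (by simp), ht, takeWhile_space_nil sp h, dropWhile_space_self sp h,
            split₀_all_space sp h]
        simp [PySem.Chars.split₀, PySem.Chars.split₀.go]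
      · have ht : ¬ (rest.takeWhile pvNotSpace).length = rest.length := by
          intro hlen
          exact hall (List.takeWhile_eq_self_iff.mp
            ((List.takeWhile_prefix pvNotSpace).eq_of_length hlen))
        have hdr : ¬ (rest.dropWhile pvNotSpace).isEmpty = true := by
          intro hE
          exact hall (List.dropWhile_eq_nil_iff.mp (List.isEmpty_iff.mp hE))
        rw [List.takeWhile_append, if_neg ht, List.dropWhile_append, if_neg hdr]
        exact congrArg _ (split₀_append_space sp h _)
  termination_by t => t.length
  decreasing_by
    · simp
    · have := (List.dropWhile_sublist (p := pvNotSpace) (l := rest)).length_le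
      simp
      omega

theorem split₀_strip (s : List Char) :
    PySem.Chars.split₀ (PySem.Chars.strip s) = PySem.Chars.split₀ s := by
  have hl : PySem.Chars.split₀ (PySem.Chars.lstrip s) = PySem.Chars.split₀ s := by
    unfold PySem.Chars.lstrip
    induction s with
    | nil => simp
    | cons c rest ih =>
      by_cases hs : PySem.Chars.isspace c
      · rw [List.dropWhile_cons_of_pos hs, ih, split₀_space_cons c rest hs]
      · rw [List.dropWhile_cons_of_neg (by simp [hs])]
  rw [← hl]
  set u := PySem.Chars.lstrip s with hu
  unfold PySem.Chars.strip
  rw [← hu]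
  unfold PySem.Chars.rstrip
  conv_rhs => rw [show u = (u.reverse.takeWhile PySem.Chars.isspace ++ (u.reverse.dropWhile PySem.Chars.isspace)).reverse by simp]
  rw [List.reverse_append]
  exact (split₀_append_space _ (fun c hc => by
    have := List.mem_reverse.mp hc
    exact List.mem_takeWhile_imp this) _).symm

-- ===== VERDICT (by name: the statement is the Claim_ definition above) =====
theorem is_likely_name_spec : Claim_equal_is_likely_name := by
  intro line _
  unfold Spec_is_likely_name is_likely_name is_likely_name_alt
  set s := line.toList with hs
  by_cases hd : s.any PySem.Chars.isdigit
  · simp [hd, altLoop_digit s false 0 0 hd]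
  · simp only [Bool.not_eq_true] at hd
    rw [altLoop_spec s false 0 0 hd]
    simp only [Bool.cond_false, Nat.zero_add]
    rw [split₀_strip s]
    have hfil : (PySem.Chars.split₀ s).filter (fun w => !w.isEmpty) = PySem.Chars.split₀ s := by
      apply List.filter_eq_self.mpr
      intro w hw
      simpa [List.isEmpty_iff] using split₀_ne_nil s w hw
    by_cases he : s.isEmpty
    · have : s = [] := List.isEmpty_iff.mp he
      simp [this, PySem.Chars.split₀, PySem.Chars.split₀.go, pvCheck, pvCapCount]
    · simp only [he, hd, Bool.or_false, Bool.false_eq_true, if_false, hfil]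
      set ws := PySem.Chars.split₀ s with hws
      have hcap : (ws.filter (fun w => !w.isEmpty &&
          (match w with | [] => false | c :: _ => PySem.Chars.isupper c))).length = pvCapCount ws := by
        unfold pvCapCount
        congr 1
        apply List.filter_congr
        intro w hw
        have hne := split₀_ne_nil s w (hws ▸ hw)
        match w with
        | [] => exact absurd rfl hne
        | c :: _ => simp [pvCapB]
      rw [hcap]
      by_cases h0 : ws.isEmpty
      · simp [pvCheck, List.isEmpty_iff.mp h0, pvCapCount]
      · by_cases h6 : ws.length > 6
        · simp [h6, pvCheck, Nat.not_le_of_lt h6]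
        · simp only [h0, h6, decide_false, Bool.or_false,
            Bool.false_eq_true, if_false]
          have hlen : 1 ≤ ws.length := by
            rcases Nat.eq_zero_or_pos ws.length with h | h
            · exact absurd (List.isEmpty_iff.mpr (List.length_eq_zero_iff.mp h)) (by simpa using h0)
            · exact h
          have h6' : ws.length ≤ 6 := Nat.not_lt.mp h6
          rw [show pvCheck ws.length (pvCapCount ws) = decide ((pvCapCount ws) ≥ max 1 (ws.length / 2)) by
            simp [pvCheck, hlen, h6']]
          rw [decide_eq_decide]
          have hfd : PySem.Int.floordiv (ws.length : Int) 2 = ((ws.length / 2 : Nat) : Int) := by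
            simp only [PySem.Int.floordiv, Int.fdiv_eq_ediv]
            omega
          rw [hfd, ge_iff_le, ge_iff_le, Int.max_def, Nat.max_def]
          split_ifs with h1 h2 h2 <;> push_cast at h1 h2 ⊢ <;> omega
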